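-- pv_equiv track=rewrite | github.com/agenda-podcast/fd2 | tools/orchestrator/run_milestone_issue.py | _wi_title_from_body
-- ===== SOURCE A (Python) =====
-- def _wi_title_from_body(body: str) -> str:
--     wi_id = ""
--     task_num = ""
--     title = ""
--     recv = ""
--     for line in body.splitlines():
--         if line.startswith("Work Item ID:"):
--             wi_id = line.split(":", 1)[1].strip()
--         elif line.startswith("Task Number:"):
--             task_num = line.split(":", 1)[1].strip()
--         elif line.startswith("Title:"):
--             title = line.split(":", 1)[1].strip()
--         elif line.startswith("Receiver Role (Next step):"):
--             recv = line.split(":", 1)[1].strip()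
--     parts = []
--     if wi_id != "":
--         parts.append(wi_id)
--     if task_num != "":
--         parts.append(task_num)
--     if title != "":
--         parts.append("-")
--         parts.append(title)
--     if recv != "":
--         parts.append("->")
--         parts.append(recv)
--     if len(parts) == 0:
--         return ""
--     return "Work Item: " + " ".join(parts)
-- ===== SOURCE B (Python) =====
-- def _wi_title_from_body(body: str) -> str:
--     lines = body.splitlines()
--
--     def last_value(prefix):
--         # last matching line wins, so search backwards and stop at the first hit
--         for line in reversed(lines):
--             if line.startswith(prefix):
--                 return line.split(":", 1)[1].strip()
--         return ""
--
--     chunks = []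
--     for prefix, marker in (("Work Item ID:", ""), ("Task Number:", ""),
--                            ("Title:", "-"), ("Receiver Role (Next step):", "->")):
--         v = last_value(prefix)
--         if v != "":
--             chunks.append(v if marker == "" else marker + " " + v)
--     if not chunks:
--         return ""
--     return "Work Item: " + " ".join(chunks)
-- ===== Notes on version B (the rewrite author's own statement) =====
-- stated objective: alternative
-- what changed: B replaces A's single forward pass that maintains four variables under a 4-way elif chain by four independent backward searches (first hit from the end of the lines = A's last-write-wins), and assembles the title from a (prefix, marker) table into a chunk list instead of A's hand-written token list; correctness rests on the four prefixes being pairwise non-prefixes, so each line feeds at most one field.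
import Mathlib
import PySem

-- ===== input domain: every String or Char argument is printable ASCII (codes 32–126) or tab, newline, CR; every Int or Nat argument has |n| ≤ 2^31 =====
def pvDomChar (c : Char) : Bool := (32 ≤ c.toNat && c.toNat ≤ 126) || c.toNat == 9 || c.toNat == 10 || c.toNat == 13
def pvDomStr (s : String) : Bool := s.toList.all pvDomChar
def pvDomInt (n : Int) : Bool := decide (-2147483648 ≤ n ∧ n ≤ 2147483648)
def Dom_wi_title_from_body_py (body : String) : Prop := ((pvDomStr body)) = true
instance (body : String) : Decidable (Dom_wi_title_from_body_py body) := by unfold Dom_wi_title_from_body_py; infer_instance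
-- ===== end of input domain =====

-- B replaces A's single forward pass with four-way per-line branching by four independent
-- backward searches (last matching line = first hit from the end) plus a chunk-list assembly
-- (objective: alternative decomposition, same cost).

-- ===== PORT A =====
-- line.split(":", 1)[1].strip(); both Pythons index [1] only on lines that start with
-- "<key>:", so the list has two elements there and the ""-defaults are unreachable totalizing guards.
def pvAfterColon (line : String) : String :=
  PySem.Str.strip ((PySem.List.pyGet? ((PySem.Str.splitMax? line ":" 1).getD []) 1).getD "")

def pvAStep (st : String × String × String × String) (line : String) :
    String × String × String × String :=
  if PySem.Str.startswith line "Work Item ID:" then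
    (pvAfterColon line, st.2.1, st.2.2.1, st.2.2.2)
  else if PySem.Str.startswith line "Task Number:" then
    (st.1, pvAfterColon line, st.2.2.1, st.2.2.2)
  else if PySem.Str.startswith line "Title:" then
    (st.1, st.2.1, pvAfterColon line, st.2.2.2)
  else if PySem.Str.startswith line "Receiver Role (Next step):" then
    (st.1, st.2.1, st.2.2.1, pvAfterColon line)
  else st

def wi_title_from_body_py (body : String) : String :=
  let st := (PySem.Str.splitlines body).foldl pvAStep ("", "", "", "")
  let parts : List String := []
  let parts := if st.1 ≠ "" then parts ++ [st.1] else parts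
  let parts := if st.2.1 ≠ "" then parts ++ [st.2.1] else parts
  let parts := if st.2.2.1 ≠ "" then parts ++ ["-"] ++ [st.2.2.1] else parts
  let parts := if st.2.2.2 ≠ "" then parts ++ ["->"] ++ [st.2.2.2] else parts
  if parts.length = 0 then "" else "Work Item: " ++ PySem.Str.join " " parts

-- ===== PORT B =====
-- last_value: scan reversed(lines), return on the first line starting with the prefix
def pvLastValue (lines : List String) (pre : String) : String :=
  match lines.reverse.find? (fun line => PySem.Str.startswith line pre) with
  | some line => pvAfterColon line
  | none => ""

def pvBTable : List (String × String) :=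
  [("Work Item ID:", ""), ("Task Number:", ""), ("Title:", "-"), ("Receiver Role (Next step):", "->")]

def wi_title_from_body_py_alt (body : String) : String :=
  let lines := PySem.Str.splitlines body
  let chunks := pvBTable.foldl (fun chunks pm =>
    let v := pvLastValue lines pm.1
    if v ≠ "" then chunks ++ [if pm.2 = "" then v else pm.2 ++ " " ++ v] else chunks)
    ([] : List String)
  if chunks = [] then "" else "Work Item: " ++ PySem.Str.join " " chunks

-- ===== PRECONDITION & SPEC =====
def Spec_wi_title_from_body_py (body : String) (out : String) : Prop := out = wi_title_from_body_py_alt body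
instance (body : String) (out : String) : Decidable (Spec_wi_title_from_body_py body out) := by unfold Spec_wi_title_from_body_py; infer_instance

-- ===== CLAIM (what is proved, stated in full; the proofs are below) =====
def Claim_equal_wi_title_from_body_py : Prop := ∀ (body : String), Dom_wi_title_from_body_py body → Spec_wi_title_from_body_py body (wi_title_from_body_py body)

-- ===== LEMMAS AND PROOFS =====

theorem pvSW (l p : String) : PySem.Str.startswith l p = true ↔ p.toList <+: l.toList := by
  rw [show PySem.Str.startswith l p = PySem.Chars.startswith l.toList p.toList from rfl,
    PySem.Chars.startswith_iff]

-- the four prefixes are pairwise non-prefixes of each other, so a line matches at most one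
theorem pvExcl (l p q : String) (hpq : ¬ p.toList <+: q.toList) (hqp : ¬ q.toList <+: p.toList)
    (h : PySem.Str.startswith l p = true) : PySem.Str.startswith l q = false := by
  rw [Bool.eq_false_iff]
  intro hq
  rcases List.prefix_or_prefix_of_prefix ((pvSW l p).mp h) ((pvSW l q).mp hq) with h1 | h1
  · exact hpq h1
  · exact hqp h1

theorem pvStep1 (st : String × String × String × String) (l : String) :
    (pvAStep st l).1 = if PySem.Str.startswith l "Work Item ID:" then pvAfterColon l else st.1 := by
  unfold pvAStep; split_ifs <;> rfl

theorem pvStep2 (st : String × String × String × String) (l : String) :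
    (pvAStep st l).2.1 = if PySem.Str.startswith l "Task Number:" then pvAfterColon l else st.2.1 := by
  unfold pvAStep
  by_cases h1 : PySem.Str.startswith l "Work Item ID:" = true
  · rw [if_pos h1, if_neg (Bool.eq_false_iff.mp (pvExcl l "Work Item ID:" "Task Number:" (by decide) (by decide) h1))]
  · rw [if_neg h1]; split_ifs <;> rfl

theorem pvStep3 (st : String × String × String × String) (l : String) :
    (pvAStep st l).2.2.1 = if PySem.Str.startswith l "Title:" then pvAfterColon l else st.2.2.1 := by
  unfold pvAStep
  by_cases h1 : PySem.Str.startswith l "Work Item ID:" = true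
  · rw [if_pos h1, if_neg (Bool.eq_false_iff.mp (pvExcl l "Work Item ID:" "Title:" (by decide) (by decide) h1))]
  · rw [if_neg h1]
    by_cases h2 : PySem.Str.startswith l "Task Number:" = true
    · rw [if_pos h2, if_neg (Bool.eq_false_iff.mp (pvExcl l "Task Number:" "Title:" (by decide) (by decide) h2))]
    · rw [if_neg h2]; split_ifs <;> rfl

theorem pvStep4 (st : String × String × String × String) (l : String) :
    (pvAStep st l).2.2.2 = if PySem.Str.startswith l "Receiver Role (Next step):" then pvAfterColon l else st.2.2.2 := by
  unfold pvAStep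
  by_cases h1 : PySem.Str.startswith l "Work Item ID:" = true
  · rw [if_pos h1, if_neg (Bool.eq_false_iff.mp (pvExcl l "Work Item ID:" "Receiver Role (Next step):" (by decide) (by decide) h1))]
  · rw [if_neg h1]
    by_cases h2 : PySem.Str.startswith l "Task Number:" = true
    · rw [if_pos h2, if_neg (Bool.eq_false_iff.mp (pvExcl l "Task Number:" "Receiver Role (Next step):" (by decide) (by decide) h2))]
    · rw [if_neg h2]
      by_cases h3 : PySem.Str.startswith l "Title:" = true
      · rw [if_pos h3, if_neg (Bool.eq_false_iff.mp (pvExcl l "Title:" "Receiver Role (Next step):" (by decide) (by decide) h3))]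
      · rw [if_neg h3]; split_ifs <;> rfl

-- a left fold whose projection is "last matching line wins" IS the backward search
theorem pvFoldFind (proj : String × String × String × String → String) (p : String)
    (hstep : ∀ st l, proj (pvAStep st l) =
      if PySem.Str.startswith l p then pvAfterColon l else proj st) :
    ∀ (lines : List String) (st : String × String × String × String),
    proj (lines.foldl pvAStep st) =
      match lines.reverse.find? (fun line => PySem.Str.startswith line p) with
      | some line => pvAfterColon line
      | none => proj st := by
  intro lines
  induction lines with
  | nil => intro st; rfl
  | cons l ls ih =>
    intro st
    simp only [List.foldl_cons, List.reverse_cons, List.find?_append, ih (pvAStep st l)]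
    cases hfind : ls.reverse.find? (fun line => PySem.Str.startswith line p) with
    | some a => rfl
    | none =>
      simp only [Option.none_or]
      rw [hstep st l]
      by_cases h : PySem.Str.startswith l p = true
      · rw [if_pos h]
        have hf : List.find? (fun line => PySem.Str.startswith line p) [l] = some l := by
          rw [List.find?_singleton]; simp only [h, if_true]
        rw [hf]
      · rw [if_neg h]
        have hf : List.find? (fun line => PySem.Str.startswith line p) [l] = none := by
          rw [List.find?_singleton]; rw [Bool.eq_false_iff.mpr h]; rfl
        rw [hf]

theorem pvComp1 (lines : List String) :
    (lines.foldl pvAStep ("", "", "", "")).1 = pvLastValue lines "Work Item ID:" := by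
  rw [pvFoldFind (fun st => st.1) "Work Item ID:" pvStep1 lines]
  unfold pvLastValue
  cases lines.reverse.find? (fun line => PySem.Str.startswith line "Work Item ID:") <;> rfl

theorem pvComp2 (lines : List String) :
    (lines.foldl pvAStep ("", "", "", "")).2.1 = pvLastValue lines "Task Number:" := by
  rw [pvFoldFind (fun st => st.2.1) "Task Number:" pvStep2 lines]
  unfold pvLastValue
  cases lines.reverse.find? (fun line => PySem.Str.startswith line "Task Number:") <;> rfl

theorem pvComp3 (lines : List String) :
    (lines.foldl pvAStep ("", "", "", "")).2.2.1 = pvLastValue lines "Title:" := by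
  rw [pvFoldFind (fun st => st.2.2.1) "Title:" pvStep3 lines]
  unfold pvLastValue
  cases lines.reverse.find? (fun line => PySem.Str.startswith line "Title:") <;> rfl

theorem pvComp4 (lines : List String) :
    (lines.foldl pvAStep ("", "", "", "")).2.2.2 = pvLastValue lines "Receiver Role (Next step):" := by
  rw [pvFoldFind (fun st => st.2.2.2) "Receiver Role (Next step):" pvStep4 lines]
  unfold pvLastValue
  cases lines.reverse.find? (fun line => PySem.Str.startswith line "Receiver Role (Next step):") <;> rfl

-- ===== VERDICT (by name: the statement is the Claim_ definition above) =====
theorem wi_title_from_body_py_spec : Claim_equal_wi_title_from_body_py := by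
  intro body _
  unfold Spec_wi_title_from_body_py wi_title_from_body_py wi_title_from_body_py_alt
  simp only [pvBTable, List.foldl_cons, List.foldl_nil, pvComp1, pvComp2, pvComp3, pvComp4]
  generalize pvLastValue (PySem.Str.splitlines body) "Work Item ID:" = v1
  generalize pvLastValue (PySem.Str.splitlines body) "Task Number:" = v2
  generalize pvLastValue (PySem.Str.splitlines body) "Title:" = v3
  generalize pvLastValue (PySem.Str.splitlines body) "Receiver Role (Next step):" = v4
  by_cases h1 : v1 = "" <;> by_cases h2 : v2 = "" <;> by_cases h3 : v3 = "" <;> by_cases h4 : v4 = "" <;>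
    (try simp [h1, h2, h3, h4]) <;>
    (first
      | rfl
      | (apply String.toList_inj.mp
         simp [PySem.Str.toList_join, PySem.Chars.join_cons_cons, PySem.Chars.join_singleton,
           String.toList_append]))
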